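-- pv_equiv track=rewrite | github.com/Maximvonshaft/nexus_helpdesk | backend/app/services/webchat_fast_session_service.py | clean_fast_context
-- ===== SOURCE A (Python) =====
-- from typing import Any
--
-- FAST_CONTEXT_LIMIT = 10
--
-- def clean_fast_context(items: list[dict[str, Any]] | None) -> list[dict[str, str]]:
--     out: list[dict[str, str]] = []
--     for item in items or []:
--         if not isinstance(item, dict):
--             continue
--         role = str(item.get("role") or "visitor").lower()
--         role = "agent" if role in {"ai", "assistant", "agent", "bot"} else "visitor"
--         text = str(item.get("text") or item.get("body") or item.get("content") or "").strip()
--         if text: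
--             out.append({"role": role, "text": text[:500]})
--     return out[-FAST_CONTEXT_LIMIT:]
-- ===== SOURCE B (Python) =====
-- FAST_CONTEXT_LIMIT = 10
--
-- def _norm(item):
--     if not isinstance(item, dict):
--         return None
--     role = str(item.get("role") or "visitor").lower()
--     role = "agent" if role in {"ai", "assistant", "agent", "bot"} else "visitor"
--     text = str(item.get("text") or item.get("body") or item.get("content") or "").strip()
--     if not text:
--         return None
--     return {"role": role, "text": text[:500]}
--
-- def clean_fast_context(items):
--     buf = []
--     for item in reversed(items or []):
--         if len(buf) == FAST_CONTEXT_LIMIT: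
--             break
--         d = _norm(item)
--         if d is not None:
--             buf.append(d)
--     buf.reverse()
--     return buf
-- ===== Notes on version B (the rewrite author's own statement) =====
-- stated objective: alternative
-- what changed: B iterates the items in reverse with a helper _norm, collecting at most 10 cleaned items and breaking early, then reverses the buffer, instead of A's filter-everything-into-out-then-slice out[-10:].
import Mathlib
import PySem

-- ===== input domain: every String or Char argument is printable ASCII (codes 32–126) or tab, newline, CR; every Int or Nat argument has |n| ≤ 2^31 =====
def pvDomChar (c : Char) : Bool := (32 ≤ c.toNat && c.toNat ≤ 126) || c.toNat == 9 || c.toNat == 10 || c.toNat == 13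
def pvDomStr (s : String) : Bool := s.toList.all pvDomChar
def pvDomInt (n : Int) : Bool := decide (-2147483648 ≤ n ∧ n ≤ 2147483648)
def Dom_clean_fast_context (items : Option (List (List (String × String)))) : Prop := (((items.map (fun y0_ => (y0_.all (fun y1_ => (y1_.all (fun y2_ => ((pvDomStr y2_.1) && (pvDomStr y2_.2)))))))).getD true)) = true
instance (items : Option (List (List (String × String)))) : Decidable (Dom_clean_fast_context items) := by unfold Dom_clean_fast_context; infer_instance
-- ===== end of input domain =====

-- B iterates the list in reverse collecting at most 10 valid items and stops early,
-- instead of A's filter-everything-then-slice; objective: alternative decomposition,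
-- same return value everywhere.

-- item.get(k): first-match lookup in the association list (exact dict semantics: insertion order, lookup = first match)
def pvGet (d : List (String × String)) (k : String) : Option String :=
  (d.find? (fun p => p.1 == k)).map (·.2)

-- `x or y` on strings/None: falls through on None and on ""
def pvOrStr (o : Option String) (y : String) : String :=
  match o with
  | some s => if s = "" then y else s
  | none => y

-- ===== PORT A =====
def clean_fast_context (items : Option (List (List (String × String)))) : List (List (String × String)) :=
  let out : List (List (String × String)) :=
    (items.getD []).foldl (fun out item =>
      -- isinstance(item, dict) is always true for our typed input
      let role := PySem.Str.lower (pvOrStr (pvGet item "role") "visitor")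
      let role := if role ∈ ["ai", "assistant", "agent", "bot"] then "agent" else "visitor"
      let text := PySem.Str.strip (pvOrStr (pvGet item "text")
                    (pvOrStr (pvGet item "body") (pvOrStr (pvGet item "content") "")))
      if text ≠ "" then out ++ [[("role", role), ("text", PySem.Str.slice text none (some 500))]]
      else out) []
  PySem.List.slice out (some (-10)) none

-- ===== PORT B =====
-- _norm(item): None for an invalid/empty item, else the cleaned dict
def pvNorm (item : List (String × String)) : Option (List (String × String)) :=
  let role := PySem.Str.lower (pvOrStr (pvGet item "role") "visitor")
  let role := if role ∈ ["ai", "assistant", "agent", "bot"] then "agent" else "visitor"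
  let text := PySem.Str.strip (pvOrStr (pvGet item "text")
                (pvOrStr (pvGet item "body") (pvOrStr (pvGet item "content") "")))
  if text = "" then none
  else some [("role", role), ("text", PySem.Str.slice text none (some 500))]

-- the reverse loop with break once 10 items are gathered
def pvGo (buf : List (List (String × String))) : List (List (String × String)) → List (List (String × String))
  | [] => buf
  | item :: rest =>
    if buf.length == 10 then buf
    else match pvNorm item with
      | some d => pvGo (buf ++ [d]) rest
      | none => pvGo buf rest

def clean_fast_context_alt (items : Option (List (List (String × String)))) : List (List (String × String)) :=
  (pvGo [] (items.getD []).reverse).reverse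

-- ===== PRECONDITION & SPEC =====
def Spec_clean_fast_context (items : Option (List (List (String × String)))) (out : List (List (String × String))) : Prop := out = clean_fast_context_alt items
instance (items : Option (List (List (String × String)))) (out : List (List (String × String))) : Decidable (Spec_clean_fast_context items out) := by unfold Spec_clean_fast_context; infer_instance

-- ===== CLAIM (what is proved, stated in full; the proofs are below) =====
def Claim_equal_clean_fast_context : Prop := ∀ (items : Option (List (List (String × String)))), Dom_clean_fast_context items → Spec_clean_fast_context items (clean_fast_context items)

-- ===== LEMMAS AND PROOFS =====

-- A's loop body is exactly 'append pvNorm item when it is some'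
lemma foldlA_eq_filterMap (l : List (List (String × String))) (acc : List (List (String × String))) :
    l.foldl (fun out item =>
      let role := PySem.Str.lower (pvOrStr (pvGet item "role") "visitor")
      let role := if role ∈ ["ai", "assistant", "agent", "bot"] then "agent" else "visitor"
      let text := PySem.Str.strip (pvOrStr (pvGet item "text")
                    (pvOrStr (pvGet item "body") (pvOrStr (pvGet item "content") "")))
      if text ≠ "" then out ++ [[("role", role), ("text", PySem.Str.slice text none (some 500))]]
      else out) acc = acc ++ l.filterMap pvNorm := by
  induction l generalizing acc with
  | nil => simp
  | cons x t ih =>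
    simp only [List.foldl_cons, List.filterMap_cons, ih, pvNorm]
    by_cases h : PySem.Str.strip (pvOrStr (pvGet x "text")
        (pvOrStr (pvGet x "body") (pvOrStr (pvGet x "content") ""))) = "" <;>
      simp [h]

-- B's loop gathers the first (10 - buf.length) valid items
lemma pvGo_eq_take (l : List (List (String × String))) (buf : List (List (String × String)))
    (hb : buf.length ≤ 10) :
    pvGo buf l = buf ++ (l.filterMap pvNorm).take (10 - buf.length) := by
  induction l generalizing buf with
  | nil => simp [pvGo]
  | cons x t ih =>
    simp only [pvGo, List.filterMap_cons]
    by_cases hfull : buf.length = 10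
    · simp [hfull]
    · have hlt : buf.length < 10 := lt_of_le_of_ne hb hfull
      have hne : (buf.length == 10) = false := by simp [hfull]
      rw [hne]
      simp only [Bool.false_eq_true, if_false]
      cases hnx : pvNorm x with
      | none => exact ih buf hb
      | some d =>
        dsimp only
        have : 10 - buf.length = (10 - (buf ++ [d]).length) + 1 := by
          simp; omega
        rw [ih (buf ++ [d]) (by simp; omega), this]
        simp [List.take_succ_cons]

theorem clean_fast_context_spec : Claim_equal_clean_fast_context := by
  intro items _
  unfold Spec_clean_fast_context clean_fast_context clean_fast_context_alt
  rw [foldlA_eq_filterMap, pvGo_eq_take _ [] (by simp)]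
  simp only [List.nil_append, List.length_nil, Nat.sub_zero, List.filterMap_reverse]
  rw [PySem.List.slice_from_neg_ofNat _ 10 (by omega)]
  rw [List.reverse_take, List.reverse_reverse, List.length_reverse]
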